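-- pv_equiv track=rewrite | github.com/TravinDSO/workchart_office | serve.py | project_label
-- ===== SOURCE A (Python) =====
-- def project_label(dirname: str) -> str:
--     """Derive a short human-friendly label from a project directory name.
--
--     Claude Code encodes paths like C:\\foo\\bar as c--foo-bar (non-alnum → hyphen).
--     The drive separator becomes '--' (e.g. C:\\ → 'C--'). After stripping the
--     drive prefix, we take the last ~25 characters worth of hyphen-separated parts.
--     """
--     # Strip drive prefix (everything up to and including '--')
--     idx = dirname.find("--")
--     tail = dirname[idx + 2:] if idx >= 0 else dirname
--
--     if not tail:
--         return dirname
--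
--     # If it's short enough, use it as-is
--     if len(tail) <= 25:
--         return tail
--
--     # Otherwise, take the last few hyphen-separated parts up to ~25 chars
--     parts = tail.split("-")
--     trailing = []
--     for p in reversed(parts):
--         candidate = "-".join([p] + trailing)
--         if len(candidate) > 25 and trailing:
--             break
--         trailing.insert(0, p)
--     return "-".join(trailing) if trailing else tail[-25:]
-- ===== SOURCE B (Python) =====
-- def project_label(dirname: str) -> str:
--     """Derive a short human-friendly label from a project directory name.
--
--     Same prefix-strip and short-circuit as before; the long case works on the
--     character string directly: the answer is always a suffix of `tail`
--     starting at a hyphen boundary, so scan the last 25 positions for the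
--     leftmost boundary and fall back to the final part (after the last hyphen).
--     """
--     idx = dirname.find("--")
--     tail = dirname[idx + 2:] if idx >= 0 else dirname
--
--     if not tail:
--         return dirname
--
--     n = len(tail)
--     if n <= 25:
--         return tail
--
--     # Leftmost hyphen boundary whose suffix fits in 25 characters.
--     for j in range(n - 25, n):
--         if tail[j - 1] == "-":
--             return tail[j:]
--
--     # No boundary in the window: keep the whole last part (even if > 25).
--     return tail[tail.rfind("-") + 1:]
-- ===== Notes on version B (the rewrite author's own statement) =====
-- stated objective: alternative
-- what changed: The long case no longer splits the tail into parts and re-joins growing candidate suffixes in a loop; B scans the last 25 character positions of the tail for the leftmost hyphen boundary and returns that suffix, falling back to the text after the last hyphen (rfind).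
import Mathlib
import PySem

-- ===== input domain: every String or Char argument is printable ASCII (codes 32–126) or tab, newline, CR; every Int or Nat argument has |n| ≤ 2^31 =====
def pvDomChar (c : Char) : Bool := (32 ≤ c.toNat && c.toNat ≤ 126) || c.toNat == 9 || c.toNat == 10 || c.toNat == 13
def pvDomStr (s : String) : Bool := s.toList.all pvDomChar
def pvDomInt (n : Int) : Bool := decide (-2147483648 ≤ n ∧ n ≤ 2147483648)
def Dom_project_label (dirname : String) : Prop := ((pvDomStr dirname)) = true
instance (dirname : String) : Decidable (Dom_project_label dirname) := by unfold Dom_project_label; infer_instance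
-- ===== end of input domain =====

-- B rewrite (objective: alternative decomposition): the long case never splits the tail into
-- parts — the answer is a suffix of `tail` at a hyphen boundary, so B scans the last 25
-- character positions for the leftmost boundary and falls back to the text after the last '-'.

-- ===== PORT A =====
-- the for-loop over reversed(parts) with the `break`
def pvAloop : List (List Char) → List (List Char) → List (List Char)
  | [], trailing => trailing
  | p :: rest, trailing =>
    if 25 < (PySem.Chars.join ['-'] (p :: trailing)).length ∧ trailing ≠ [] then trailing
    else pvAloop rest (p :: trailing)

def project_label (dirname : String) : String :=
  let s := dirname.toList
  let idx := PySem.Chars.find s ['-', '-']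
  let tail := if 0 ≤ idx then PySem.List.slice s (some (idx + 2)) none else s
  if tail = [] then dirname
  else if tail.length ≤ 25 then String.ofList tail
  else
    let parts := PySem.Chars.splitOn tail ['-']
    let trailing := pvAloop parts.reverse []
    if trailing ≠ [] then String.ofList (PySem.Chars.join ['-'] trailing)
    else String.ofList (PySem.List.slice tail (some (-25)) none)

-- ===== PORT B =====
-- the for-loop over range(n-25, n) with its early return; [] reaches the rfind fallback
def pvBscan (tail : List Char) : List Int → List Char
  | [] => PySem.List.slice tail (some (PySem.Chars.rfind tail ['-'] + 1)) none
  | j :: js =>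
    if PySem.List.pyGet? tail (j - 1) = some '-' then PySem.List.slice tail (some j) none
    else pvBscan tail js

def project_label_alt (dirname : String) : String :=
  let s := dirname.toList
  let idx := PySem.Chars.find s ['-', '-']
  let tail := if 0 ≤ idx then PySem.List.slice s (some (idx + 2)) none else s
  if tail = [] then dirname
  else
    let n : Int := tail.length
    if n ≤ 25 then String.ofList tail
    else String.ofList (pvBscan tail (PySem.List.pyRange (n - 25) n 1))

-- ===== PRECONDITION & SPEC =====
def Spec_project_label (dirname : String) (out : String) : Prop := out = project_label_alt dirname
instance (dirname : String) (out : String) : Decidable (Spec_project_label dirname out) := by unfold Spec_project_label; infer_instance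

-- ===== CLAIM (what is proved, stated in full; the proofs are below) =====
def Claim_equal_project_label : Prop := ∀ (dirname : String), Dom_project_label dirname → Spec_project_label dirname (project_label dirname)

-- ===== LEMMAS AND PROOFS =====

-- structural version of Python's str.split("-")
def pvSplit : List Char → List Char → List (List Char)
  | [], cur => [cur.reverse]
  | ch :: rest, cur =>
    if ch = '-' then cur.reverse :: pvSplit rest []
    else pvSplit rest (ch :: cur)

theorem pvSplit_go_spec (fuel : ℕ) : ∀ (l cur : List Char) (acc : List (List Char)),
    l.length < fuel →
    PySem.Chars.splitOn.go ['-'] fuel l cur acc = acc.reverse ++ pvSplit l cur := by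
  induction fuel with
  | zero => intro l cur acc h; exact absurd h (by omega)
  | succ f IH =>
    intro l cur acc h
    cases l with
    | nil =>
      rw [PySem.Chars.splitOn.go]
      simp [pvSplit]
      omega
    | cons ch rest =>
      rw [PySem.Chars.splitOn.go]
      by_cases hc : ch = '-'
      · subst hc
        have hpre : List.isPrefixOf ['-'] ('-' :: rest) = true := by
          simp [List.isPrefixOf]
        rw [if_pos hpre]
        simp only [List.length_cons] at h
        have := IH rest [] (cur.reverse :: acc) (by omega)
        simp [pvSplit, this]
      · have hpre : List.isPrefixOf ['-'] (ch :: rest) = false := by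
          simp [List.isPrefixOf]
          exact fun hcc => absurd hcc.symm hc
        rw [if_neg (by simp [hpre])]
        simp only [List.length_cons] at h
        rw [IH rest (ch :: cur) acc (by omega)]
        simp [pvSplit, hc]

theorem splitOn_eq_pvSplit (l : List Char) :
    PySem.Chars.splitOn l ['-'] = pvSplit l [] := by
  unfold PySem.Chars.splitOn
  rw [pvSplit_go_spec (l.length + 1) l [] [] (by omega)]
  simp

theorem pvSplit_ne_nil (l cur : List Char) : pvSplit l cur ≠ [] := by
  induction l generalizing cur with
  | nil => simp [pvSplit]
  | cons ch rest IH =>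
    simp only [pvSplit]
    split
    · simp
    · exact IH _

theorem join_cons_ne_nil (sep p : List Char) (rest : List (List Char)) (h : rest ≠ []) :
    PySem.Chars.join sep (p :: rest) = p ++ sep ++ PySem.Chars.join sep rest := by
  cases rest with
  | nil => exact absurd rfl h
  | cons q rs => exact PySem.Chars.join_cons_cons sep p q rs

theorem join_pvSplit (l : List Char) : ∀ cur,
    PySem.Chars.join ['-'] (pvSplit l cur) = cur.reverse ++ l := by
  induction l with
  | nil => intro cur; simp [pvSplit, PySem.Chars.join_singleton]
  | cons ch rest IH =>
    intro cur
    simp only [pvSplit]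
    by_cases hc : ch = '-'
    · rw [if_pos hc, join_cons_ne_nil _ _ _ (pvSplit_ne_nil _ _), IH []]
      simp [hc]
    · rw [if_neg hc, IH (ch :: cur)]
      simp

theorem pvSplit_not_mem (l : List Char) : ∀ cur p, ('-') ∉ cur → p ∈ pvSplit l cur → ('-') ∉ p := by
  induction l with
  | nil =>
    intro cur p hcur hp
    have hp' : p = cur.reverse := by simpa [pvSplit] using hp
    subst hp'
    simpa using hcur
  | cons ch rest IH =>
    intro cur p hcur hp
    simp only [pvSplit] at hp
    split at hp
    · next hc =>
      rcases List.mem_cons.mp hp with hp1 | hp2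
      · subst hp1; simpa using hcur
      · exact IH [] p (by simp) hp2
    · next hc =>
      refine IH (ch :: cur) p ?_ hp
      intro hmem
      rcases List.mem_cons.mp hmem with h1 | h2
      · exact hc h1.symm
      · exact hcur h2

theorem join_length (ps : List (List Char)) (h : ps ≠ []) :
    (PySem.Chars.join ['-'] ps).length + 1 = (ps.map List.length).sum + ps.length := by
  induction ps with
  | nil => exact absurd rfl h
  | cons p rest IH =>
    cases rest with
    | nil => simp [PySem.Chars.join_singleton]
    | cons q rs =>
      rw [PySem.Chars.join_cons_cons]
      have := IH (by simp)
      simp only [List.map_cons, List.sum_cons, List.length_cons, List.length_append,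
        List.length_nil] at *
      omega

theorem join_length_suffix_le (u v : List (List Char)) (hv : v ≠ []) :
    (PySem.Chars.join ['-'] v).length ≤ (PySem.Chars.join ['-'] (u ++ v)).length := by
  have h1 := join_length v hv
  have h2 := join_length (u ++ v) (by simp [hv])
  simp only [List.map_append, List.sum_append, List.length_append] at h2
  omega

theorem pvAloop_ne_nil : ∀ (xs acc : List (List Char)), acc ≠ [] ∨ xs ≠ [] → pvAloop xs acc ≠ [] := by
  intro xs
  induction xs with
  | nil =>
    intro acc h
    rcases h with h | h
    · simpa [pvAloop] using h
    · exact absurd rfl h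
  | cons p rest IH =>
    intro acc h
    simp only [pvAloop]
    split
    · next hcond => exact hcond.2
    · exact IH (p :: acc) (Or.inl (by simp))

theorem pvAloop_full : ∀ (xs acc ys : List (List Char)),
    (PySem.Chars.join ['-'] (xs.reverse ++ acc)).length ≤ 25 →
    pvAloop (xs ++ ys) acc = pvAloop ys (xs.reverse ++ acc) := by
  intro xs
  induction xs with
  | nil => intro acc ys h; simp
  | cons x xs' IH =>
    intro acc ys h
    rw [show (x :: xs').reverse ++ acc = xs'.reverse ++ (x :: acc) by simp] at h
    have hle : (PySem.Chars.join ['-'] (x :: acc)).length ≤ 25 :=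
      le_trans (join_length_suffix_le xs'.reverse (x :: acc) (by simp)) h
    simp only [List.cons_append, pvAloop]
    rw [if_neg (by intro hcon; exact absurd hcon.1 (by omega))]
    rw [IH (x :: acc) ys h]
    rw [show (x :: xs').reverse ++ acc = xs'.reverse ++ (x :: acc) by simp]

theorem pvAloop_break : ∀ (xs acc ys : List (List Char)),
    25 < (PySem.Chars.join ['-'] (xs.reverse ++ acc)).length →
    xs.reverse ++ acc ≠ [] →
    pvAloop (xs ++ ys) acc = pvAloop xs acc := by
  intro xs
  induction xs with
  | nil =>
    intro acc ys h hne
    simp only [List.reverse_nil, List.nil_append] at h hne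
    cases ys with
    | nil => rfl
    | cons y ys' =>
      simp only [List.nil_append, pvAloop]
      rw [if_pos ⟨lt_of_lt_of_le h (join_length_suffix_le [y] acc hne), hne⟩]
  | cons x xs' IH =>
    intro acc ys h hne
    rw [show (x :: xs').reverse ++ acc = xs'.reverse ++ (x :: acc) by simp] at h
    simp only [List.cons_append, pvAloop]
    by_cases hcond : 25 < (PySem.Chars.join ['-'] (x :: acc)).length ∧ acc ≠ []
    · rw [if_pos hcond, if_pos hcond]
    · rw [if_neg hcond, if_neg hcond]
      exact IH (x :: acc) ys h (by simp)

-- pyGet? membership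
theorem pyGet?_mem {α : Type} (xs : List α) (i : Int) (a : α)
    (h : PySem.List.pyGet? xs i = some a) : a ∈ xs := by
  simp only [PySem.List.pyGet?] at h
  rcases Option.bind_eq_some_iff.mp h with ⟨k, _, hget⟩
  exact List.mem_of_getElem? hget

theorem pvBscan_skip (tail : List Char) (js₁ js₂ : List Int)
    (h : ∀ j ∈ js₁, ¬ (PySem.List.pyGet? tail (j - 1) = some '-')) :
    pvBscan tail (js₁ ++ js₂) = pvBscan tail js₂ := by
  induction js₁ with
  | nil => simp
  | cons j js IH =>
    simp only [List.cons_append, pvBscan]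
    rw [if_neg (h j (List.mem_cons_self))]
    exact IH (fun j' hj' => h j' (List.mem_cons_of_mem _ hj'))

-- rfind spec pieces
theorem rfind_go_neg (s sub : List Char) : ∀ k : ℕ,
    (∀ j : ℕ, j ≤ k → ¬ sub.isPrefixOf (s.drop j) = true) →
    PySem.Chars.rfind.go s sub k = -1 := by
  intro k
  induction k with
  | zero =>
    intro h
    rw [PySem.Chars.rfind.go]
    rw [if_neg (by simpa using h 0 (le_refl 0))]
  | succ j IH =>
    intro h
    rw [PySem.Chars.rfind.go]
    rw [if_neg (by simpa using h (j + 1) (le_refl _))]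
    exact IH (fun j' hj' => h j' (by omega))

theorem rfind_go_mem (s sub : List Char) (j0 : ℕ)
    (hp : sub.isPrefixOf (s.drop j0) = true)
    (habove : ∀ j : ℕ, j0 < j → ¬ sub.isPrefixOf (s.drop j) = true) :
    ∀ k : ℕ, j0 ≤ k → PySem.Chars.rfind.go s sub k = j0 := by
  intro k
  induction k with
  | zero =>
    intro hk
    have : j0 = 0 := by omega
    subst this
    rw [PySem.Chars.rfind.go]
    rw [if_pos (by simpa using hp)]
    rfl
  | succ j IH =>
    intro hk
    by_cases hj : j0 = j + 1
    · subst hj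
      rw [PySem.Chars.rfind.go]
      rw [if_pos (by simpa using hp)]
    · rw [PySem.Chars.rfind.go]
      rw [if_neg (by simpa using habove (j + 1) (by omega))]
      exact IH (by omega)

theorem rfind_not_mem (s : List Char) (h : ('-') ∉ s) : PySem.Chars.rfind s ['-'] = -1 := by
  unfold PySem.Chars.rfind
  apply rfind_go_neg
  intro j _ hpre
  rw [List.isPrefixOf_iff_prefix] at hpre
  exact h (List.drop_subset j s (hpre.subset (List.mem_cons_self)))

theorem rfind_append_last (xs ys : List Char) (h : ('-') ∉ ys) :
    PySem.Chars.rfind (xs ++ '-' :: ys) ['-'] = xs.length := by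
  unfold PySem.Chars.rfind
  apply rfind_go_mem
  · rw [show List.drop xs.length (xs ++ '-' :: ys) = '-' :: ys by
      simpa using List.drop_left xs ('-' :: ys)]
    simp [List.isPrefixOf]
  · intro j hj hpre
    rw [List.isPrefixOf_iff_prefix] at hpre
    have hmem : ('-') ∈ List.drop j (xs ++ '-' :: ys) := hpre.subset (List.mem_cons_self)
    rw [List.drop_append] at hmem
    rw [List.drop_eq_nil_of_le (by omega)] at hmem
    simp only [List.nil_append] at hmem
    have hge : 1 ≤ j - xs.length := by omega
    have : ('-') ∈ List.drop (j - xs.length) ('-' :: ys) := hmem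
    rcases Nat.exists_eq_add_of_le hge with ⟨m, hm⟩
    have hm' : j - xs.length = m + 1 := by omega
    rw [hm'] at this
    simp only [List.drop_succ_cons] at this
    exact h (List.drop_subset _ _ this)
  · simpa using Nat.le_add_right xs.length (ys.length + 1)

theorem last_hyphen_decomp (l : List Char) (h : ('-') ∈ l) :
    ∃ u v, l = u ++ '-' :: v ∧ ('-') ∉ v := by
  induction l with
  | nil => simp at h
  | cons c rest IH =>
    by_cases hr : ('-') ∈ rest
    · obtain ⟨u, v, h1, h2⟩ := IH hr
      exact ⟨c :: u, v, by simp [h1], h2⟩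
    · have hc : c = '-' := by
        rcases List.mem_cons.mp h with h' | h'
        · exact h'.symm
        · exact absurd h' hr
      exact ⟨[], rest, by simp [hc], hr⟩

-- shift lemmas
theorem pyGet?_shift {α : Type} (u w : List α) (c : α) (i : Int) (hi : 0 ≤ i) :
    PySem.List.pyGet? (u ++ c :: w) (i + u.length + 1) = PySem.List.pyGet? w i := by
  lift i to ℕ using hi with k
  rw [show (k : Int) + u.length + 1 = ((k + u.length + 1 : ℕ) : ℤ) by push_cast; ring]
  rw [PySem.List.pyGet?_natCast, PySem.List.pyGet?_natCast]
  rw [show u ++ c :: w = (u ++ [c]) ++ w by simp]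
  rw [List.getElem?_append_right (by
    simp only [List.length_append, List.length_cons, List.length_nil]
    omega)]
  congr 1
  simp

theorem slice_shift {α : Type} (u w : List α) (c : α) (i : Int) (hi : 0 ≤ i) :
    PySem.List.slice (u ++ c :: w) (some (i + u.length + 1)) none = PySem.List.slice w (some i) none := by
  rw [PySem.List.slice_from _ (by omega), PySem.List.slice_from _ hi]
  lift i to ℕ using hi with k
  rw [show ((k : Int) + u.length + 1).toNat = k + u.length + 1 by omega]
  rw [show u ++ c :: w = (u ++ [c]) ++ w by simp]
  rw [List.drop_append]
  rw [List.drop_eq_nil_of_le (by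
    simp only [List.length_append, List.length_cons, List.length_nil]
    omega)]
  simp

theorem fallback_shift (p l' : List Char) (_hp : ('-') ∉ p) :
    PySem.List.slice (p ++ '-' :: l') (some (PySem.Chars.rfind (p ++ '-' :: l') ['-'] + 1)) none
      = PySem.List.slice l' (some (PySem.Chars.rfind l' ['-'] + 1)) none := by
  by_cases hm : ('-') ∈ l'
  · obtain ⟨u, v, rfl, hv⟩ := last_hyphen_decomp l' hm
    have hr1 : PySem.Chars.rfind (u ++ '-' :: v) ['-'] = u.length := rfind_append_last u v hv
    have hr2 : PySem.Chars.rfind (p ++ '-' :: (u ++ '-' :: v)) ['-'] = (p ++ '-' :: u).length := by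
      rw [show p ++ '-' :: (u ++ '-' :: v) = (p ++ '-' :: u) ++ '-' :: v by simp]
      exact rfind_append_last _ v hv
    rw [hr1, hr2]
    have := slice_shift p (u ++ '-' :: v) '-' ((u.length : Int) + 1) (by omega)
    rw [show ((p ++ '-' :: u).length : Int) + 1 = (u.length : Int) + 1 + p.length + 1 by
      simp [List.length_append]; ring]
    exact this
  · rw [rfind_not_mem l' hm, rfind_append_last p l' hm]
    have := slice_shift p l' '-' 0 (by omega)
    rw [show (p.length : Int) + 1 = (0 : Int) + p.length + 1 by ring]
    rw [show (-1 : Int) + 1 = 0 by ring]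
    exact this

theorem pyRange_one_map_add (a b k : Int) :
    (PySem.List.pyRange a b 1).map (· + k) = PySem.List.pyRange (a + k) (b + k) 1 := by
  rw [PySem.List.pyRange_one, PySem.List.pyRange_one]
  rw [List.map_map]
  rw [show b + k - (a + k) = b - a by ring]
  congr 1
  funext m
  simp
  ring

theorem pvBscan_shift (p l' : List Char) (hp : ('-') ∉ p) : ∀ js : List Int,
    (∀ j ∈ js, 1 ≤ j) →
    pvBscan (p ++ '-' :: l') (js.map (· + ((p.length : Int) + 1))) = pvBscan l' js := by
  intro js
  induction js with
  | nil =>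
    intro _
    simpa [pvBscan] using fallback_shift p l' hp
  | cons j js IH =>
    intro hb
    have hj : 1 ≤ j := hb j (List.mem_cons_self)
    simp only [List.map_cons, pvBscan]
    have hidx : PySem.List.pyGet? (p ++ '-' :: l') (j + ((p.length : Int) + 1) - 1)
        = PySem.List.pyGet? l' (j - 1) := by
      rw [show j + ((p.length : Int) + 1) - 1 = (j - 1) + p.length + 1 by ring]
      exact pyGet?_shift p l' '-' (j - 1) (by omega)
    rw [hidx]
    by_cases hhit : PySem.List.pyGet? l' (j - 1) = some '-'
    · rw [if_pos hhit, if_pos hhit]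
      rw [show j + ((p.length : Int) + 1) = j + p.length + 1 by ring]
      exact slice_shift p l' '-' j (by omega)
    · rw [if_neg hhit, if_neg hhit]
      exact IH (fun j' hj' => hb j' (List.mem_cons_of_mem _ hj'))

-- the central equality of the two long-case computations
theorem pvKey : ∀ ps : List (List Char), ps ≠ [] → (∀ p ∈ ps, ('-') ∉ p) →
    25 < (PySem.Chars.join ['-'] ps).length →
    PySem.Chars.join ['-'] (pvAloop ps.reverse []) =
      pvBscan (PySem.Chars.join ['-'] ps)
        (PySem.List.pyRange (((PySem.Chars.join ['-'] ps).length : Int) - 25)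
          ((PySem.Chars.join ['-'] ps).length : Int) 1) := by
  intro ps
  induction ps with
  | nil => intro h; exact absurd rfl h
  | cons p ps' IH =>
    intro _ hfree hlen
    have hpfree : ('-') ∉ p := hfree p (List.mem_cons_self)
    by_cases hps' : ps' = []
    · subst hps'
      rw [PySem.Chars.join_singleton] at hlen ⊢
      have hL : pvAloop [p].reverse [] = [p] := by
        simp [pvAloop]
      rw [hL, PySem.Chars.join_singleton]
      have hmiss : ∀ j ∈ PySem.List.pyRange ((p.length : Int) - 25) (p.length : Int) 1,
          ¬ (PySem.List.pyGet? p (j - 1) = some '-') :=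
        fun j _ hcon => hpfree (pyGet?_mem p (j - 1) '-' hcon)
      rw [← List.append_nil (PySem.List.pyRange ((p.length : Int) - 25) (p.length : Int) 1)]
      rw [pvBscan_skip p _ [] hmiss]
      simp only [pvBscan]
      rw [rfind_not_mem p hpfree]
      rw [show (-1 : Int) + 1 = 0 by ring]
      rw [PySem.List.slice_from _ (by omega)]
      simp
    · have hT : PySem.Chars.join ['-'] (p :: ps') = p ++ '-' :: PySem.Chars.join ['-'] ps' := by
        rw [join_cons_ne_nil _ _ _ hps']
        simp [List.append_assoc]
      set l' := PySem.Chars.join ['-'] ps' with hl'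
      by_cases hsmall : l'.length ≤ 25
      · -- trailing parts all fit: A keeps exactly ps', B finds the boundary after p
        have h1 : pvAloop (p :: ps').reverse [] = ps' := by
          rw [List.reverse_cons]
          rw [pvAloop_full ps'.reverse [] [p] (by simpa using hsmall)]
          simp only [List.reverse_reverse, List.append_nil, pvAloop]
          rw [if_pos ⟨by omega, hps'⟩]
        rw [h1]
        rw [hT] at hlen ⊢
        set n : ℕ := (p ++ '-' :: l').length with hn
        have hnval : n = p.length + 1 + l'.length := by
          rw [hn]
          simp only [List.length_append, List.length_cons]
          omega
        have hsplitrange : PySem.List.pyRange ((n : Int) - 25) (n : Int) 1 =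
            PySem.List.pyRange ((n : Int) - 25) ((p.length : Int) + 1) 1 ++
            PySem.List.pyRange ((p.length : Int) + 1) (n : Int) 1 :=
          PySem.List.pyRange_one_append _ _ _ (by omega) (by omega)
        rw [hsplitrange]
        rw [pvBscan_skip _ _ _ ?hmiss]
        case hmiss =>
          intro j hj hcon
          rw [PySem.List.mem_pyRange_one] at hj
          have hj1 : (1 : Int) ≤ j := by omega
          have h0 : (0 : Int) ≤ j - 1 := by omega
          lift j - 1 to ℕ using h0 with k hk
          rw [PySem.List.pyGet?_natCast] at hcon
          have hklt : k < p.length := by omega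
          rw [List.getElem?_append_left hklt] at hcon
          exact hpfree (List.mem_of_getElem? hcon)
        by_cases hl'nil : l' = []
        · have hn2 : (p.length : Int) + 1 = (n : Int) := by
            rw [hnval, hl'nil]; push_cast; simp
          rw [hn2]
          rw [show PySem.List.pyRange (n : Int) (n : Int) 1 = [] by
            rw [PySem.List.pyRange_one]; simp]
          simp only [pvBscan]
          rw [show p ++ '-' :: l' = p ++ '-' :: [] by rw [hl'nil]] at *
          rw [rfind_append_last p [] (by simp)]
          have := slice_shift p ([] : List Char) '-' 0 (by omega)
          rw [show (p.length : Int) + 1 = (0 : Int) + p.length + 1 by ring]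
          rw [this]
          rw [PySem.List.slice_from _ (by omega)]
          rw [← hl', hl'nil]
          simp
        · have hofflt : ((p.length : Int) + 1) < (n : Int) := by
            have : l'.length ≠ 0 := fun hc => hl'nil (List.eq_nil_of_length_eq_zero hc)
            omega
          rw [PySem.List.pyRange_one_cons hofflt]
          simp only [pvBscan]
          have hhit : PySem.List.pyGet? (p ++ '-' :: l') ((p.length : Int) + 1 - 1) = some '-' := by
            rw [show (p.length : Int) + 1 - 1 = ((p.length : ℕ) : Int) by ring]
            rw [PySem.List.pyGet?_natCast]
            rw [List.getElem?_append_right (le_refl _)]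
            simp
          rw [if_pos hhit]
          have := slice_shift p l' '-' 0 (by omega)
          rw [show (p.length : Int) + 1 = (0 : Int) + p.length + 1 by ring, this]
          rw [PySem.List.slice_from _ (by omega)]
          simp only [Int.toNat_zero, List.drop_zero]
          exact hl'.symm
      · -- the trailing parts alone already exceed 25: both sides reduce to the tail l'
        have hL : pvAloop (p :: ps').reverse [] = pvAloop ps'.reverse [] := by
          rw [List.reverse_cons]
          exact pvAloop_break ps'.reverse [] [p]
            (by simpa using (by omega : 25 < l'.length)) (by simp [hps'])
        rw [hL]
        have hIH := IH hps' (fun q hq => hfree q (List.mem_cons_of_mem _ hq))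
          (by omega : 25 < l'.length)
        rw [hIH, hT]
        set n : ℕ := (p ++ '-' :: l').length with hn
        have hnval : n = p.length + 1 + l'.length := by
          rw [hn]
          simp only [List.length_append, List.length_cons]
          omega
        have hrange : PySem.List.pyRange ((n : Int) - 25) (n : Int) 1 =
            (PySem.List.pyRange ((l'.length : Int) - 25) (l'.length : Int) 1).map
              (· + ((p.length : Int) + 1)) := by
          rw [pyRange_one_map_add]
          congr 1 <;> omega
        rw [hrange]
        exact (pvBscan_shift p l' hpfree _
          (fun j hj => by rw [PySem.List.mem_pyRange_one] at hj; omega)).symm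

-- ===== VERDICT (by name: the statement is the Claim_ definition above) =====
theorem project_label_spec : Claim_equal_project_label := by
  intro dirname _
  unfold Spec_project_label project_label project_label_alt
  simp only []
  set s := dirname.toList with hs
  set idx := PySem.Chars.find s ['-', '-'] with hidx
  set tail := (if 0 ≤ idx then PySem.List.slice s (some (idx + 2)) none else s) with htail
  by_cases h0 : tail = []
  · rw [if_pos h0, if_pos h0]
  · rw [if_neg h0, if_neg h0]
    by_cases h1 : tail.length ≤ 25
    · rw [if_pos h1, if_pos (show ((tail.length : Int)) ≤ 25 by exact_mod_cast h1)]
    · rw [if_neg h1]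
      have hsplit := splitOn_eq_pvSplit tail
      have hne : pvSplit tail [] ≠ [] := pvSplit_ne_nil tail []
      have hfree : ∀ p ∈ pvSplit tail [], ('-') ∉ p :=
        fun p hp => pvSplit_not_mem tail [] p (by simp) hp
      have hjoin : PySem.Chars.join ['-'] (pvSplit tail []) = tail := by
        simpa using join_pvSplit tail []
      have htr : pvAloop (pvSplit tail []).reverse [] ≠ [] :=
        pvAloop_ne_nil _ _ (Or.inr (by simpa using hne))
      rw [hsplit, if_pos htr]
      rw [if_neg (show ¬ ((tail.length : Int)) ≤ 25 by exact_mod_cast h1)]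
      have key := pvKey (pvSplit tail []) hne hfree (by rw [hjoin]; omega)
      rw [hjoin] at key
      rw [key]
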